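-- pv_equiv track=rewrite | github.com/Kazun1998/library_for_python | Integer.py | Divisor_Sigma
-- ===== SOURCE A (Python) =====
-- def Prime_Factorization(N):
--     if N==0:
--         return [[0,1]]
--
--     if N<0:
--         R=[[-1,1]]
--     else:
--         R=[]
--
--     N=abs(N)
--
--     if N&1==0:
--         C=0
--         while N&1==0:
--             N>>=1
--             C+=1
--         R.append([2,C])
--
--     if N%3==0:
--         C=0
--         while N%3==0:
--             N//=3
--             C+=1
--         R.append([3,C])
--
--     k=5
--     Flag=0
--     while k*k<=N:
--         if N%k==0:
--             C=0
--             while N%k==0: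
--                 C+=1
--                 N//=k
--             R.append([k,C])
--         k+=2+2*Flag
--         Flag^=1
--
--     if N!=1:
--         R.append([N,1])
--
--     return R
--
-- def Divisor_Sigma(N,K=1):
--     if N==1:
--         return 1
--
--     H=Prime_Factorization(N)
--
--     R=1
--     p=2
--     while p*p<=N:
--         if N%p==0:
--             e=0
--             while N%p==0:
--                 N//=p
--                 e+=1
--
--             if K:
--                 s=pow(p,K)
--                 R*=(pow(s,e+1)-1)//(s-1)
--             else:
--                 R*=e+1
--         p+=1
--
--     if N>1:
--         R*=pow(N,K)+1
--
--     return R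
-- ===== SOURCE B (Python) =====
-- def Divisor_Sigma(N, K=1):
--     if N <= 1:
--         return 1
--
--     R = 0
--     d = 1
--     while d * d <= N:
--         if N % d == 0:
--             R += pow(d, K)
--             q = N // d
--             if q != d:
--                 R += pow(q, K)
--         d += 1
--     return R
-- ===== Notes on version B (the rewrite author's own statement) =====
-- stated objective: alternative
-- what changed: A factorizes N twice (a wheel factorization whose result is discarded, then a second step-1 trial-division scan that rebuilds each prime's geometric-series factor with an integer division); B never factorizes at all: it enumerates the divisor pairs (d, N//d) for d up to sqrt(N) and sums pow(d,K)+pow(N//d,K) directly.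
-- outside the precondition, e.g. on Divisor_Sigma(4, -1): A returns 1.0, B returns 1.75
import Mathlib
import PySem

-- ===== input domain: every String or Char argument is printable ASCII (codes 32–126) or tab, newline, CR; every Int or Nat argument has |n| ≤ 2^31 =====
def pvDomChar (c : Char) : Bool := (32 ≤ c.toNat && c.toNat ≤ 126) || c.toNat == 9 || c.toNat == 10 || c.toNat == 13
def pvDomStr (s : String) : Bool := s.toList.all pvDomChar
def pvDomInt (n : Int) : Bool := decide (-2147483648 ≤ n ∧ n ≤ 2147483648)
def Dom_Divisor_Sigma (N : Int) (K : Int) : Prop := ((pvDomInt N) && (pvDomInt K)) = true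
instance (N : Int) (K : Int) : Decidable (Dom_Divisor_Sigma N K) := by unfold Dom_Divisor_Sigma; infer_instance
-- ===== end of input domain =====

-- B replaces A's double trial-division (a wheel factorization whose result is discarded plus a
-- second step-1 scan building geometric-series factors) by a single scan over divisor pairs
-- (d, N//d) up to sqrt(N), summing their K-th powers directly — no factorization at all.


-- ===== PORT A =====

-- termination helpers for the division loops (cited in decreasing_by only)
theorem pvEdivLt (n p : Int) (h1 : 0 < n) (h2 : 1 < p) : n / p < n := by
  apply Int.ediv_lt_of_lt_mul (lt_trans zero_lt_one h2)
  nlinarith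

theorem pvExtractDec (p n : Int) (h : 2 ≤ p ∧ 1 ≤ n ∧ PySem.Int.mod n p = 0) :
    (PySem.Int.floordiv n p).toNat < n.toNat := by
  have hp : (0:Int) < p := by omega
  rw [PySem.Int.floordiv_eq_ediv_of_pos hp]
  have h1 : n / p < n := pvEdivLt n p (by omega) (by omega)
  have h2 : (0:Int) ≤ n / p := Int.ediv_nonneg (by omega) (by omega)
  omega

-- helper for A: Python's  `while N%p==0: N//=p; C+=1`  (the source contains this loop at several
-- places; for p = 2 the source writes it as `while N&1==0: N>>=1; C+=1`, identical for N ≥ 0).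
-- The guards 2 ≤ p and 1 ≤ n are for termination only; they hold at every call site.
def pvExtract (p n e : Int) : Int × Int :=
  if h : 2 ≤ p ∧ 1 ≤ n ∧ PySem.Int.mod n p = 0 then
    pvExtract p (PySem.Int.floordiv n p) (e + 1)
  else (n, e)
termination_by n.toNat
decreasing_by exact pvExtractDec p n h

-- bounds cited by the termination proofs of the scanning loops below
theorem pvExtract_fst_bounds (p n e : Int) (hn : 1 ≤ n) :
    1 ≤ (pvExtract p n e).1 ∧ (pvExtract p n e).1 ≤ n := by
  induction n, e using pvExtract.induct p with
  | case1 n e h ih =>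
    rw [pvExtract, dif_pos h]
    have hp : (0:Int) < p := by omega
    have hdvd : p ∣ n := (PySem.Int.mod_eq_zero_iff_dvd n p).mp h.2.2
    have hpn : p ≤ n := Int.le_of_dvd (by omega) hdvd
    have h1 : 1 ≤ PySem.Int.floordiv n p := by
      rw [PySem.Int.floordiv_eq_ediv_of_pos hp, Int.le_ediv_iff_mul_le hp]; omega
    have h3 := ih h1
    have h2 : PySem.Int.floordiv n p ≤ n := by
      rw [PySem.Int.floordiv_eq_ediv_of_pos hp]
      have := Int.ediv_le_self p (show (0:Int) ≤ n by omega)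
      omega
    exact ⟨h3.1, le_trans h3.2 h2⟩
  | case2 n e h => rw [pvExtract, dif_neg h]; exact ⟨hn, le_refl n⟩

theorem pvExtract_fst_lt (p n e : Int) (hp : 2 ≤ p) (hn : 1 ≤ n)
    (hm : PySem.Int.mod n p = 0) : 1 ≤ (pvExtract p n e).1 ∧ (pvExtract p n e).1 < n := by
  rw [pvExtract, dif_pos ⟨hp, hn, hm⟩]
  have hp0 : (0:Int) < p := by omega
  have hdvd : p ∣ n := (PySem.Int.mod_eq_zero_iff_dvd n p).mp hm
  have hpn : p ≤ n := Int.le_of_dvd (by omega) hdvd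
  have h1 : 1 ≤ PySem.Int.floordiv n p := by
    rw [PySem.Int.floordiv_eq_ediv_of_pos hp0, Int.le_ediv_iff_mul_le hp0]; omega
  have hlt : PySem.Int.floordiv n p < n := by
    rw [PySem.Int.floordiv_eq_ediv_of_pos hp0]
    exact pvEdivLt n p (by omega) (by omega)
  have h3 := pvExtract_fst_bounds p (PySem.Int.floordiv n p) (e + 1) h1
  exact ⟨h3.1, lt_of_le_of_lt h3.2 hlt⟩

-- termination lemmas for the two scanning loops (cited in decreasing_by only)
theorem pvScanDec1 (p n q : Int) (hp : 2 ≤ p) (hsq : p * p ≤ n)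
    (hm : PySem.Int.mod n p = 0) (_hq : p < q) :
    Prod.Lex (· < ·) (· < ·)
      ((pvExtract p n 0).1.toNat, ((pvExtract p n 0).1 - q).toNat)
      (n.toNat, (n - p).toNat) := by
  have hn : (1:Int) ≤ n := by nlinarith
  have hlt := pvExtract_fst_lt p n 0 hp hn hm
  exact Prod.Lex.left _ _ (by omega)

theorem pvScanDec2 (p n q : Int) (hp : 2 ≤ p) (hsq : p * p ≤ n) (hq : p < q) :
    Prod.Lex (· < ·) (· < ·) (n.toNat, (n - q).toNat) (n.toNat, (n - p).toNat) := by
  have hpn : p < n := by nlinarith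
  exact Prod.Lex.right _ (by omega)

theorem pvWheelDec1 (k flag n : Int) (h : k * k ≤ n ∧ 5 ≤ k ∧ 0 ≤ flag)
    (hm : PySem.Int.mod n k = 0) :
    Prod.Lex (· < ·) (· < ·)
      ((pvExtract k n 0).1.toNat, ((pvExtract k n 0).1 - (k + 2 + 2 * flag)).toNat)
      (n.toNat, (n - k).toNat) :=
  pvScanDec1 k n (k + 2 + 2 * flag) (by omega) h.1 hm (by omega)

theorem pvWheelDec2 (k flag n : Int) (h : k * k ≤ n ∧ 5 ≤ k ∧ 0 ≤ flag) :
    Prod.Lex (· < ·) (· < ·) (n.toNat, (n - (k + 2 + 2 * flag)).toNat)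
      (n.toNat, (n - k).toNat) :=
  pvScanDec2 k n (k + 2 + 2 * flag) (by omega) h.1 (by omega)

theorem pvDsDec1 (p n : Int) (h : p * p ≤ n ∧ 2 ≤ p) (hm : PySem.Int.mod n p = 0) :
    Prod.Lex (· < ·) (· < ·)
      ((pvExtract p n 0).1.toNat, ((pvExtract p n 0).1 - (p + 1)).toNat)
      (n.toNat, (n - p).toNat) :=
  pvScanDec1 p n (p + 1) h.2 h.1 hm (by omega)

theorem pvDsDec2 (p n : Int) (h : p * p ≤ n ∧ 2 ≤ p) :
    Prod.Lex (· < ·) (· < ·) (n.toNat, (n - (p + 1)).toNat) (n.toNat, (n - p).toNat) :=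
  pvScanDec2 p n (p + 1) h.2 h.1 (by omega)

-- the `while k*k<=N` wheel loop of Prime_Factorization.  `Flag^=1` is ported as `1 - flag`
-- (Flag only ever holds 0 or 1); the guards 5 ≤ k and 0 ≤ flag are for termination only and
-- hold at every call site.
def pvWheel (k flag n : Int) (R : List (Int × Int)) : Int × List (Int × Int) :=
  if h : k * k ≤ n ∧ 5 ≤ k ∧ 0 ≤ flag then
    if hm : PySem.Int.mod n k = 0 then
      let t := pvExtract k n 0
      pvWheel (k + 2 + 2 * flag) (1 - flag) t.1 (R ++ [(k, t.2)])
    else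
      pvWheel (k + 2 + 2 * flag) (1 - flag) n R
  else (n, R)
termination_by (n.toNat, (n - k).toNat)
decreasing_by
  · exact pvWheelDec1 k flag n h hm
  · exact pvWheelDec2 k flag n h

def Prime_Factorization (N : Int) : List (Int × Int) :=
  if N = 0 then [(0, 1)] else
  let R0 : List (Int × Int) := if N < 0 then [(-1, 1)] else []
  let n0 := |N|
  let s1 : Int × List (Int × Int) :=
    if PySem.Int.mod n0 2 = 0 then
      let t := pvExtract 2 n0 0
      (t.1, R0 ++ [(2, t.2)])
    else (n0, R0)
  let s2 : Int × List (Int × Int) :=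
    if PySem.Int.mod s1.1 3 = 0 then
      let t := pvExtract 3 s1.1 0
      (t.1, s1.2 ++ [(3, t.2)])
    else s1
  let s3 := pvWheel 5 0 s2.1 s2.2
  if s3.1 ≠ 1 then s3.2 ++ [(s3.1, 1)] else s3.2

-- A's inline re-factorization loop `while p*p<=N`.  pow(x, K) with K ≥ 0 (Pre_) is x ^ K.toNat.
-- The guard 2 ≤ p is for termination only (p starts at 2 and grows).
def pvDsLoop (p n r K : Int) : Int × Int :=
  if h : p * p ≤ n ∧ 2 ≤ p then
    if hm : PySem.Int.mod n p = 0 then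
      let t := pvExtract p n 0
      let r' : Int :=
        if K ≠ 0 then
          let s := p ^ K.toNat
          r * PySem.Int.floordiv (s ^ (t.2 + 1).toNat - 1) (s - 1)
        else r * (t.2 + 1)
      pvDsLoop (p + 1) t.1 r' K
    else pvDsLoop (p + 1) n r K
  else (n, r)
termination_by (n.toNat, (n - p).toNat)
decreasing_by
  · exact pvDsDec1 p n h hm
  · exact pvDsDec2 p n h

def Divisor_Sigma (N : Int) (K : Int) : Int :=
  if N = 1 then 1 else
  let _H := Prime_Factorization N   -- A computes H and never uses it
  let t := pvDsLoop 2 N 1 K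
  if 1 < t.1 then t.2 * (t.1 ^ K.toNat + 1) else t.2

-- ===== PORT B =====

-- termination of B's single scan (cited in decreasing_by only)
theorem pvDivDec (n d : Int) (h : d * d ≤ n ∧ 1 ≤ d) :
    (n + 1 - (d + 1)).toNat < (n + 1 - d).toNat := by
  have hdn : d ≤ n := le_trans (le_mul_of_one_le_left (by omega) h.2) h.1
  omega

-- B's `while d*d<=N` divisor-pair loop; pow(x, K) with K ≥ 0 (Pre_) is x ^ K.toNat.
-- The guard 1 ≤ d is for termination only (d starts at 1 and grows).
def pvDivLoop (K n d R : Int) : Int :=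
  if _h : d * d ≤ n ∧ 1 ≤ d then
    pvDivLoop K n (d + 1)
      (if PySem.Int.mod n d = 0 then
        R + d ^ K.toNat +
          (if PySem.Int.floordiv n d ≠ d then (PySem.Int.floordiv n d) ^ K.toNat else 0)
      else R)
  else R
termination_by (n + 1 - d).toNat
decreasing_by exact pvDivDec n d _h

def Divisor_Sigma_alt (N : Int) (K : Int) : Int :=
  if N ≤ 1 then 1 else pvDivLoop K N 1 0

-- ===== PRECONDITION & SPEC =====
-- Pre_ excludes K < 0 with 2 ≤ N: there Python's pow(p, K) is a float, so A (and B alike)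
-- return a float, not a value of the declared int type.
def Pre_Divisor_Sigma (N : Int) (K : Int) : Prop := 0 ≤ K ∨ N ≤ 1
instance (N : Int) (K : Int) : Decidable (Pre_Divisor_Sigma N K) := by
  unfold Pre_Divisor_Sigma; infer_instance

def pvWitness_Divisor_Sigma : Int × Int := (12, 2)

def Spec_Divisor_Sigma (N : Int) (K : Int) (out : Int) : Prop := out = Divisor_Sigma_alt N K
instance (N : Int) (K : Int) (out : Int) : Decidable (Spec_Divisor_Sigma N K out) := by
  unfold Spec_Divisor_Sigma; infer_instance

-- ===== CLAIM (what is proved, stated in full; the proofs are below) =====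
def Claim_equal_Divisor_Sigma : Prop := ∀ (N : Int) (K : Int), Dom_Divisor_Sigma N K →
  Pre_Divisor_Sigma N K → Spec_Divisor_Sigma N K (Divisor_Sigma N K)

-- ===== LEMMAS AND PROOFS =====

-- the per-prime factor of the divisor power sum, as A computes it
def pvTerm (K : Int) (pe : Int × Int) : Int :=
  if K ≠ 0 then
    PySem.Int.floordiv ((pe.1 ^ K.toNat) ^ (pe.2 + 1).toNat - 1) (pe.1 ^ K.toNat - 1)
  else pe.2 + 1

-- "n has no divisor d with 2 ≤ d < p"
def pvNoSmall (n p : Int) : Prop := ∀ d : Int, 2 ≤ d → d < p → ¬ d ∣ n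

-- ---- basic facts about pvExtract ----

theorem pvExtract_spec (p : Int) (hp : 2 ≤ p) : ∀ n e : Int, 1 ≤ n →
    ∃ c : Nat, (pvExtract p n e).2 = e + c ∧ n = p ^ c * (pvExtract p n e).1 ∧
      ¬ p ∣ (pvExtract p n e).1 ∧ (PySem.Int.mod n p = 0 → 1 ≤ c) := by
  intro n e
  induction n, e using pvExtract.induct p with
  | case1 n e h ih =>
    intro hn
    have hp0 : (0:Int) < p := by omega
    have hdvd : p ∣ n := (PySem.Int.mod_eq_zero_iff_dvd n p).mp h.2.2
    have hpn : p ≤ n := Int.le_of_dvd (by omega) hdvd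
    have h1 : 1 ≤ PySem.Int.floordiv n p := by
      rw [PySem.Int.floordiv_eq_ediv_of_pos hp0, Int.le_ediv_iff_mul_le hp0]; omega
    have hmul : p * PySem.Int.floordiv n p = n := by
      rw [PySem.Int.floordiv_eq_ediv_of_pos hp0]
      exact Int.mul_ediv_cancel' hdvd
    obtain ⟨c, hc1, hc2, hc3, _⟩ := ih h1
    rw [pvExtract, dif_pos h]
    refine ⟨c + 1, by push_cast [hc1]; ring, ?_, hc3, by omega⟩
    calc n = p * PySem.Int.floordiv n p := hmul.symm
    _ = p * (p ^ c * (pvExtract p (PySem.Int.floordiv n p) (e + 1)).1) := by rw [← hc2]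
    _ = p ^ (c + 1) * (pvExtract p (PySem.Int.floordiv n p) (e + 1)).1 := by ring
  | case2 n e h =>
    intro hn
    have hm : ¬ PySem.Int.mod n p = 0 := fun hm => h ⟨hp, hn, hm⟩
    rw [pvExtract, dif_neg h]
    exact ⟨0, by simp, by simp, fun hd => hm ((PySem.Int.mod_eq_zero_iff_dvd n p).mpr hd),
      fun hc => absurd hc hm⟩

-- ---- primality from the scanning invariant ----

theorem pvNoSmall_le (n p : Int) (hn : 2 ≤ n) (h : pvNoSmall n p) : p ≤ n := by
  by_contra hc
  exact h n hn (by omega) dvd_rfl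

theorem pvPrime_of_nosmall (n p : Int) (hp : 0 ≤ p) (hn : 2 ≤ n) (h : pvNoSmall n p)
    (hsq : ¬ p * p ≤ n) : Prime n := by
  rw [Int.prime_iff_natAbs_prime, Nat.prime_def_lt']
  refine ⟨by omega, fun m hm2 hmlt hmd => ?_⟩
  have hd : (m : Int) ∣ n := by
    have : (m : Int) ∣ (n.natAbs : Int) := Int.natCast_dvd_natCast.mpr hmd
    rwa [Int.natAbs_of_nonneg (by omega)] at this
  obtain ⟨q, hq⟩ := hd
  have hmn : (m : Int) < n := by omega
  have hq1 : 1 ≤ q := by nlinarith [hq]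
  have hqd : q ∣ n := ⟨(m : Int), by linarith [hq, mul_comm (m : Int) q]⟩
  have hq2 : 2 ≤ q := by
    by_contra hc
    have : q = 1 := by omega
    rw [this, mul_one] at hq; omega
  have hmp : (m : Int) < p ∨ p ≤ (m : Int) := lt_or_ge _ _
  rcases hmp with hlt | hge
  · exact h m (by exact_mod_cast hm2) hlt ⟨q, hq⟩
  · have hqp : q < p := by nlinarith [hq]
    exact h q hq2 hqp hqd

theorem pvPrime_of_dvd_nosmall (n p : Int) (hp : 2 ≤ p) (_hn : 1 ≤ n)
    (hd : p ∣ n) (h : pvNoSmall n p) : Prime p := by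
  rw [Int.prime_iff_natAbs_prime, Nat.prime_def_lt']
  refine ⟨by omega, fun m hm2 hmlt hmd => ?_⟩
  have hdp : (m : Int) ∣ p := by
    have : (m : Int) ∣ (p.natAbs : Int) := Int.natCast_dvd_natCast.mpr hmd
    rwa [Int.natAbs_of_nonneg (by omega)] at this
  exact h m (by exact_mod_cast hm2) (by omega) (hdp.trans hd)

-- ---- A's scan produces a factorization into powers of increasing primes ----

-- pvDsLoop with the product stripped out: the (p,e) pairs A's scan emits
def pvFacA (p n : Int) : Int × List (Int × Int) :=
  if h : p * p ≤ n ∧ 2 ≤ p then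
    if hm : PySem.Int.mod n p = 0 then
      let t := pvExtract p n 0
      let rest := pvFacA (p + 1) t.1
      (rest.1, (p, t.2) :: rest.2)
    else pvFacA (p + 1) n
  else (n, [])
termination_by (n.toNat, (n - p).toNat)
decreasing_by
  · exact pvDsDec1 p n h hm
  · exact pvDsDec2 p n h

theorem pvDsLoop_eq (K : Int) : ∀ p n r : Int,
    pvDsLoop p n r K = ((pvFacA p n).1, r * ((pvFacA p n).2.map (pvTerm K)).prod) := by
  intro p n r
  induction p, n, r using pvDsLoop.induct K with
  | case1 p n r h hm t r' ih =>
    rw [pvDsLoop, dif_pos h, dif_pos hm, pvFacA, dif_pos h, dif_pos hm]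
    simp only [t, r', dite_eq_ite] at ih
    simp only
    rw [ih]
    refine Prod.ext rfl ?_
    simp only [List.map_cons, List.prod_cons, pvTerm]
    split_ifs <;> ring
  | case2 p n r h hm ih =>
    rw [pvDsLoop, dif_pos h, dif_neg hm, pvFacA, dif_pos h, dif_neg hm]
    exact ih
  | case3 p n r h =>
    rw [pvDsLoop, dif_neg h, pvFacA, dif_neg h]
    simp

theorem pvFacA_spec : ∀ p n : Int, 2 ≤ p → 1 ≤ n → pvNoSmall n p →
    (∀ pe ∈ (pvFacA p n).2, p ≤ pe.1 ∧ 1 ≤ pe.2 ∧ Prime pe.1) ∧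
    List.Pairwise (fun a b : Int × Int => a.1 < b.1) (pvFacA p n).2 ∧
    ((pvFacA p n).2.map (fun pe : Int × Int => pe.1 ^ pe.2.toNat)).prod * (pvFacA p n).1 = n ∧
    1 ≤ (pvFacA p n).1 ∧
    ((pvFacA p n).1 = 1 ∨ (Prime (pvFacA p n).1 ∧ p ≤ (pvFacA p n).1 ∧
      ∀ pe ∈ (pvFacA p n).2, pe.1 < (pvFacA p n).1)) := by
  intro p n
  induction p, n using pvFacA.induct with
  | case1 p n h hm t ih =>
    intro hp hn hns
    have hdvd : p ∣ n := (PySem.Int.mod_eq_zero_iff_dvd n p).mp hm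
    obtain ⟨c, hc1, hc2, hc3, hc4⟩ := pvExtract_spec p hp n 0 hn
    have hb := pvExtract_fst_lt p n 0 hp hn hm
    have ht1 : (pvExtract p n 0).1 ∣ n := by
      have hd1 : (pvExtract p n 0).1 ∣ p ^ c * (pvExtract p n 0).1 := dvd_mul_left _ _
      rwa [← hc2] at hd1
    have hnsm : pvNoSmall (pvExtract p n 0).1 (p + 1) := by
      intro d h2 h3 hdm
      rcases (show d < p ∨ d = p by omega) with hd | hd
      · exact hns d h2 hd (hdm.trans ht1)
      · subst hd; exact hc3 hdm
    have hprime : Prime p := pvPrime_of_dvd_nosmall n p hp hn hdvd hns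
    have IH := ih (by omega) hb.1 hnsm
    simp only [t] at IH ⊢
    rw [pvFacA, dif_pos h, dif_pos hm]
    simp only
    obtain ⟨ih1, ih2, ih3, ih4, ih5⟩ := IH
    have he1 : 1 ≤ (pvExtract p n 0).2 := by
      have := hc4 hm; omega
    refine ⟨?_, ?_, ?_, ih4, ?_⟩
    · intro pe hpe
      rcases List.mem_cons.mp hpe with hd | hd
      · subst hd; exact ⟨le_refl p, he1, hprime⟩
      · obtain ⟨a1, a2, a3⟩ := ih1 pe hd
        exact ⟨by omega, a2, a3⟩
    · refine List.pairwise_cons.mpr ⟨fun b hb' => ?_, ih2⟩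
      have := (ih1 b hb').1; simp only; omega
    · simp only [List.map_cons, List.prod_cons]
      have he2 : (pvExtract p n 0).2.toNat = c := by omega
      rw [he2, mul_assoc, ih3, ← hc2]
    · rcases ih5 with h1 | ⟨hpr, hple, hall⟩
      · exact Or.inl h1
      · refine Or.inr ⟨hpr, by omega, ?_⟩
        intro pe hpe
        rcases List.mem_cons.mp hpe with hd | hd
        · subst hd; simp only; omega
        · exact hall pe hd
  | case2 p n h hm ih =>
    intro hp hn hns
    have hnd : ¬ p ∣ n := fun hd => hm ((PySem.Int.mod_eq_zero_iff_dvd n p).mpr hd)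
    have hns' : pvNoSmall n (p + 1) := by
      intro d h2 h3 hdm
      rcases (show d < p ∨ d = p by omega) with hd | hd
      · exact hns d h2 hd hdm
      · subst hd; exact hnd hdm
    have IH := ih (by omega) hn hns'
    rw [pvFacA, dif_pos h, dif_neg hm]
    obtain ⟨ih1, ih2, ih3, ih4, ih5⟩ := IH
    refine ⟨?_, ih2, ih3, ih4, ?_⟩
    · intro pe hpe
      obtain ⟨a1, a2, a3⟩ := ih1 pe hpe
      exact ⟨by omega, a2, a3⟩
    · rcases ih5 with h1 | ⟨hpr, hple, hall⟩
      · exact Or.inl h1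
      · exact Or.inr ⟨hpr, by omega, hall⟩
  | case3 p n h =>
    intro hp hn hns
    have hsq : ¬ p * p ≤ n := fun hs => h ⟨hs, hp⟩
    rw [pvFacA, dif_neg h]
    simp only
    refine ⟨by simp, by simp, by simp, hn, ?_⟩
    by_cases h1 : n = 1
    · exact Or.inl h1
    · refine Or.inr ⟨pvPrime_of_nosmall n p (by omega) (by omega) hns hsq,
        pvNoSmall_le n p (by omega) hns, by simp⟩

-- A's full factor list (scan results plus the leftover prime)
def pvFAFull (N : Int) : List (Int × Int) :=
  if 1 < (pvFacA 2 N).1 then (pvFacA 2 N).2 ++ [((pvFacA 2 N).1, 1)] else (pvFacA 2 N).2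

theorem pvFAFull_good (N : Int) (hN : 2 ≤ N) :
    (∀ pe ∈ pvFAFull N, 2 ≤ pe.1 ∧ 1 ≤ pe.2 ∧ Prime pe.1) ∧
    List.Pairwise (fun a b : Int × Int => a.1 < b.1) (pvFAFull N) ∧
    ((pvFAFull N).map (fun pe : Int × Int => pe.1 ^ pe.2.toNat)).prod = N := by
  have hns : pvNoSmall N 2 := fun d h2 h3 _ => absurd h3 (by omega)
  obtain ⟨h1, h2, h3, h4, h5⟩ := pvFacA_spec 2 N (le_refl 2) (by omega) hns
  unfold pvFAFull
  by_cases hf : 1 < (pvFacA 2 N).1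
  · rw [if_pos hf]
    have hfp : Prime (pvFacA 2 N).1 ∧ ∀ pe ∈ (pvFacA 2 N).2, pe.1 < (pvFacA 2 N).1 := by
      rcases h5 with h | h
      · omega
      · exact ⟨h.1, h.2.2⟩
    refine ⟨?_, ?_, ?_⟩
    · intro pe hpe
      rcases List.mem_append.mp hpe with hd | hd
      · exact h1 pe hd
      · simp at hd; subst hd; exact ⟨by omega, by norm_num, hfp.1⟩
    · rw [List.pairwise_append]
      refine ⟨h2, List.pairwise_singleton _ _, fun a ha b hb => ?_⟩
      simp at hb; subst hb; exact hfp.2 a ha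
    · rw [List.map_append, List.prod_append]
      simp only [List.map_cons, List.map_nil, List.prod_cons, List.prod_nil]
      have : ((1:Int)).toNat = 1 := rfl
      rw [this, pow_one, mul_one]
      exact h3
  · rw [if_neg hf]
    have hone : (pvFacA 2 N).1 = 1 := by omega
    exact ⟨h1, h2, by rw [hone, mul_one] at h3; exact h3⟩

theorem pvTerm_leftover (q K : Int) (hq : 2 ≤ q) (hK : 0 ≤ K) :
    pvTerm K (q, 1) = q ^ K.toNat + 1 := by
  by_cases hK0 : K = 0
  · subst hK0; simp [pvTerm]
  · have ht : K.toNat ≠ 0 := by omega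
    have hs : 2 ≤ q ^ K.toNat := le_trans hq (le_self_pow₀ (by omega) ht)
    simp only [pvTerm, if_pos (show K ≠ 0 from hK0)]
    have h1 : ((1:Int) + 1).toNat = 2 := by decide
    have h2 : (q ^ K.toNat) ^ ((1:Int) + 1).toNat - 1 =
        (q ^ K.toNat - 1) * (q ^ K.toNat + 1) := by rw [h1]; ring
    rw [h2, PySem.Int.floordiv_eq_ediv_of_pos (by omega)]
    exact Int.mul_ediv_cancel_left _ (by omega)

-- ---- the factor list evaluates to the classical divisor-power sum ----

theorem pvPrimeEq (p q : Int) (hp2 : 2 ≤ p) (hq2 : 2 ≤ q) (hq : Prime q) (hd : p ∣ q) :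
    p = q := by
  have h1 : p.natAbs ∣ q.natAbs := Int.natAbs_dvd_natAbs.mpr hd
  have hqn : Nat.Prime q.natAbs := Int.prime_iff_natAbs_prime.mp hq
  have := hqn.eq_one_or_self_of_dvd _ h1
  omega

theorem pvPrimeMemOfDvdProd (L : List (Int × Int)) (p : Int)
    (hent : ∀ pe ∈ L, 2 ≤ pe.1 ∧ 1 ≤ pe.2 ∧ Prime pe.1) (hp : Prime p) (h2 : 2 ≤ p)
    (hd : p ∣ (L.map (fun pe : Int × Int => pe.1 ^ pe.2.toNat)).prod) :
    ∃ pe ∈ L, p = pe.1 := by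
  obtain ⟨a, ha, hda⟩ := (Prime.dvd_prod_iff hp).mp hd
  obtain ⟨pe, hpe, rfl⟩ := List.mem_map.mp ha
  have hpd : p ∣ pe.1 := hp.dvd_of_dvd_pow hda
  exact ⟨pe, hpe, pvPrimeEq p pe.1 h2 (hent pe hpe).1 (hent pe hpe).2.2 hpd⟩

theorem pvProdPos (L : List (Int × Int)) (hent : ∀ pe ∈ L, 2 ≤ pe.1) :
    0 < (L.map (fun pe : Int × Int => pe.1 ^ pe.2.toNat)).prod := by
  apply List.prod_pos
  intro x hx
  obtain ⟨pe, hpe, rfl⟩ := List.mem_map.mp hx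
  exact pow_pos (by have := hent pe hpe; omega) _

-- A's per-prime term is sigma of the prime power
theorem pvTerm_sigma (K p e : Int) (hK : 0 ≤ K) (h2 : 2 ≤ p) (hp : Prime p) (he : 1 ≤ e) :
    pvTerm K (p, e) = ((ArithmeticFunction.sigma K.toNat) (p.toNat ^ e.toNat) : ℤ) := by
  have hpN : Nat.Prime p.toNat := by
    have := Int.prime_iff_natAbs_prime.mp hp
    rwa [show p.natAbs = p.toNat by omega] at this
  have hcast : ((p.toNat : ℕ) : ℤ) = p := Int.toNat_of_nonneg (by omega)
  rw [ArithmeticFunction.sigma_apply, Nat.divisors_prime_pow hpN, Finset.sum_map]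
  simp only [Function.Embedding.coeFn_mk]
  have hsum : ((∑ i ∈ Finset.range (e.toNat + 1), (p.toNat ^ i) ^ K.toNat : ℕ) : ℤ) =
      ∑ i ∈ Finset.range (e.toNat + 1), (p ^ i) ^ K.toNat := by
    push_cast [hcast]
    rfl
  rw [hsum]
  by_cases hK0 : K = 0
  · subst hK0
    simp only [pvTerm, ne_eq, not_true_eq_false, if_false, Int.toNat_zero, pow_zero,
      Finset.sum_const, Finset.card_range, nsmul_eq_mul, mul_one]
    omega
  · have ht : K.toNat ≠ 0 := by omega
    have hs : 2 ≤ p ^ K.toNat := le_trans h2 (le_self_pow₀ (by omega) ht)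
    have hcomm : ∀ i ∈ Finset.range (e.toNat + 1),
        (p ^ K.toNat) ^ i = (p ^ i) ^ K.toNat := by
      intro i _
      rw [← pow_mul, ← pow_mul, Nat.mul_comm]
    rw [← Finset.sum_congr rfl hcomm]
    simp only [pvTerm, if_pos (show K ≠ 0 from hK0)]
    have hexp : (e + 1).toNat = e.toNat + 1 := by omega
    have hg := geom_sum_mul (p ^ K.toNat) (e.toNat + 1)
    rw [hexp, ← hg, PySem.Int.floordiv_eq_ediv_of_pos (by omega : (0:Int) < p ^ K.toNat - 1)]
    exact Int.mul_ediv_cancel _ (by omega)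

-- a product of powers of pairwise distinct primes turns sigma multiplicative
theorem pvGood_to_sigma (K : Int) (hK : 0 ≤ K) : ∀ L : List (Int × Int),
    (∀ pe ∈ L, 2 ≤ pe.1 ∧ 1 ≤ pe.2 ∧ Prime pe.1) →
    List.Pairwise (fun a b : Int × Int => a.1 < b.1) L →
    (L.map (pvTerm K)).prod =
      ((ArithmeticFunction.sigma K.toNat)
        ((L.map (fun pe : Int × Int => pe.1 ^ pe.2.toNat)).prod).toNat : ℤ) := by
  intro L
  induction L with
  | nil =>
    intro _ _
    simp [ArithmeticFunction.sigma_apply, Nat.divisors_one]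
  | cons pe t ih =>
    intro hent hpair
    have hpe := hent pe List.mem_cons_self
    have hentt : ∀ x ∈ t, 2 ≤ x.1 ∧ 1 ≤ x.2 ∧ Prime x.1 :=
      fun x hx => hent x (List.mem_cons_of_mem _ hx)
    have hpairt := (List.pairwise_cons.mp hpair).2
    have hm : 0 < (t.map (fun x : Int × Int => x.1 ^ x.2.toNat)).prod :=
      pvProdPos t (fun x hx => (hentt x hx).1)
    have hP : 0 < pe.1 ^ pe.2.toNat := pow_pos (by omega) _
    have hpN : Nat.Prime pe.1.toNat := by
      have := Int.prime_iff_natAbs_prime.mp hpe.2.2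
      rwa [show pe.1.natAbs = pe.1.toNat by omega] at this
    -- p does not divide the tail product
    have hnot : ¬ pe.1.toNat ∣ ((t.map (fun x : Int × Int => x.1 ^ x.2.toNat)).prod).toNat := by
      intro hdd
      have hdZ : pe.1 ∣ (t.map (fun x : Int × Int => x.1 ^ x.2.toNat)).prod := by
        have := Int.natCast_dvd_natCast.mpr hdd
        rwa [Int.toNat_of_nonneg (by omega : (0:Int) ≤ pe.1),
          Int.toNat_of_nonneg (by omega)] at this
      obtain ⟨q, hq, hqe⟩ := pvPrimeMemOfDvdProd t pe.1 hentt hpe.2.2 hpe.1 hdZ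
      have := (List.pairwise_cons.mp hpair).1 q hq
      omega
    have hco : Nat.Coprime (pe.1.toNat ^ pe.2.toNat)
        ((t.map (fun x : Int × Int => x.1 ^ x.2.toNat)).prod).toNat :=
      Nat.Coprime.pow_left _ ((Nat.Prime.coprime_iff_not_dvd hpN).mpr hnot)
    have htN : ((pe.1 ^ pe.2.toNat * (t.map (fun x : Int × Int => x.1 ^ x.2.toNat)).prod).toNat)
        = pe.1.toNat ^ pe.2.toNat *
          ((t.map (fun x : Int × Int => x.1 ^ x.2.toNat)).prod).toNat := by
      have hc : ((pe.1.toNat ^ pe.2.toNat *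
          ((t.map (fun x : Int × Int => x.1 ^ x.2.toNat)).prod).toNat : ℕ) : ℤ) =
          pe.1 ^ pe.2.toNat * (t.map (fun x : Int × Int => x.1 ^ x.2.toNat)).prod := by
        push_cast [Int.toNat_of_nonneg (by omega : (0:Int) ≤ pe.1),
          Int.toNat_of_nonneg (le_of_lt hm)]
        ring
      omega
    rw [List.map_cons, List.prod_cons, List.map_cons, List.prod_cons, htN,
      ArithmeticFunction.IsMultiplicative.map_mul_of_coprime
        ArithmeticFunction.isMultiplicative_sigma hco,
      ih hentt hpairt, pvTerm_sigma K pe.1 pe.2 hK hpe.1 hpe.2.2 hpe.2.1]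
    push_cast
    ring

-- ---- B's divisor-pair scan sums over all divisors ----

-- the divisors not yet visited when the loop counter is at j
def pvTset (n j : ℕ) : Finset ℕ := n.divisors.filter (fun x => j ≤ x ∧ j ≤ n / x)

theorem pvTset_empty (n j : ℕ) (hj : ¬ j * j ≤ n) : pvTset n j = ∅ := by
  ext x
  simp only [pvTset, Finset.mem_filter, Nat.mem_divisors, Finset.notMem_empty, iff_false]
  rintro ⟨⟨hdvd, hn0⟩, hjx, hjd⟩
  exact hj (le_trans (Nat.mul_le_mul hjx hjd) (le_of_eq (Nat.mul_div_cancel' hdvd)))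

theorem pvTset_one (n : ℕ) (hn : 1 ≤ n) : pvTset n 1 = n.divisors := by
  ext x
  simp only [pvTset, Finset.mem_filter, Nat.mem_divisors, and_iff_left_iff_imp]
  rintro ⟨hdvd, hn0⟩
  have hx : 0 < x := Nat.pos_of_dvd_of_pos hdvd (by omega)
  have hxn : x ≤ n := Nat.le_of_dvd (by omega) hdvd
  exact ⟨hx, Nat.div_pos hxn hx⟩

theorem pvTset_step_ndvd (n j : ℕ) (hnd : ¬ j ∣ n) : pvTset n j = pvTset n (j + 1) := by
  ext x
  simp only [pvTset, Finset.mem_filter, Nat.mem_divisors]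
  constructor
  · rintro ⟨⟨hdvd, hn0⟩, hjx, hjd⟩
    have hx : x ≠ j := fun h => hnd (h ▸ hdvd)
    have hdx : n / x ∣ n := Nat.div_dvd_of_dvd hdvd
    have hdxj : n / x ≠ j := fun h => hnd (h ▸ hdx)
    exact ⟨⟨hdvd, hn0⟩, by omega, by omega⟩
  · rintro ⟨⟨hdvd, hn0⟩, hjx, hjd⟩
    exact ⟨⟨hdvd, hn0⟩, by omega, by omega⟩

theorem pvTset_step_dvd (n j : ℕ) (hj : 1 ≤ j) (hn : 1 ≤ n) (hsq : j * j ≤ n) (hd : j ∣ n) :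
    pvTset n j = ({j, n / j} : Finset ℕ) ∪ pvTset n (j + 1) ∧
    Disjoint ({j, n / j} : Finset ℕ) (pvTset n (j + 1)) := by
  have hjd : j ≤ n / j := (Nat.le_div_iff_mul_le (by omega)).mpr hsq
  have hdj : n / j ∣ n := Nat.div_dvd_of_dvd hd
  have hback : n / (n / j) = j := Nat.div_div_self hd (by omega)
  constructor
  · ext x
    simp only [pvTset, Finset.mem_union, Finset.mem_insert, Finset.mem_singleton,
      Finset.mem_filter, Nat.mem_divisors]
    constructor
    · rintro ⟨⟨hdvd, hn0⟩, hjx, hjdx⟩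
      by_cases hx1 : x = j
      · exact Or.inl (Or.inl hx1)
      by_cases hx2 : x = n / j
      · exact Or.inl (Or.inr hx2)
      refine Or.inr ⟨⟨hdvd, hn0⟩, by omega, ?_⟩
      have hdxj : n / x ≠ j := by
        intro h
        have : x = n / j := by
          rw [← h, Nat.div_div_self hdvd (by omega)]
        exact hx2 this
      omega
    · intro hx
      rcases hx with (rfl | rfl) | ⟨⟨hdvd, hn0⟩, hjx, hjdx⟩
      · exact ⟨⟨hd, by omega⟩, le_refl _, hjd⟩
      · exact ⟨⟨hdj, by omega⟩, hjd, by rw [hback]⟩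
      · exact ⟨⟨hdvd, hn0⟩, by omega, by omega⟩
  · rw [Finset.disjoint_left]
    intro x hx hx'
    simp only [Finset.mem_insert, Finset.mem_singleton] at hx
    simp only [pvTset, Finset.mem_filter, Nat.mem_divisors] at hx'
    rcases hx with hx | hx
    · omega
    · subst hx
      rw [hback] at hx'
      omega

theorem pvPairSum (n j k : ℕ) (hj : 1 ≤ j) (hn : 1 ≤ n) (hsq : j * j ≤ n) (hd : j ∣ n) :
    ∑ x ∈ pvTset n j, x ^ k =
      j ^ k + (if n / j ≠ j then (n / j) ^ k else 0) + ∑ x ∈ pvTset n (j + 1), x ^ k := by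
  obtain ⟨hset, hdis⟩ := pvTset_step_dvd n j hj hn hsq hd
  rw [hset, Finset.sum_union hdis]
  by_cases hq : n / j = j
  · rw [hq]
    simp
  · rw [if_pos hq, Finset.sum_pair (by omega : j ≠ n / j)]

-- the loop invariant of B's scan
theorem pvDivLoop_sum (K N : Int) (hN : 1 ≤ N) : ∀ (d R : Int),
    1 ≤ d →
    pvDivLoop K N d R = R + ((∑ x ∈ pvTset N.toNat d.toNat, x ^ K.toNat : ℕ) : ℤ) := by
  intro d R
  induction d, R using pvDivLoop.induct K N with
  | case1 d R h ih =>
    intro hd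
    have hdC : ((d.toNat : ℕ) : ℤ) = d := Int.toNat_of_nonneg (by omega)
    have hnC : ((N.toNat : ℕ) : ℤ) = N := Int.toNat_of_nonneg (by omega)
    have hjj : d.toNat * d.toNat ≤ N.toNat := by
      have h1 := h.1
      rw [← hdC, ← hnC] at h1
      exact_mod_cast h1
    have hsucc : (d + 1).toNat = d.toNat + 1 := by omega
    have ih' := ih (by omega)
    simp only [dite_eq_ite] at ih'
    rw [pvDivLoop, dif_pos h, ih', hsucc]
    by_cases hm : PySem.Int.mod N d = 0
    · have hdvdZ : d ∣ N := (PySem.Int.mod_eq_zero_iff_dvd N d).mp hm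
      have hdvd : d.toNat ∣ N.toNat := by
        rw [← hdC, ← hnC] at hdvdZ
        exact_mod_cast hdvdZ
      have hq : PySem.Int.floordiv N d = ((N.toNat / d.toNat : ℕ) : ℤ) := by
        rw [PySem.Int.floordiv_eq_ediv_of_pos (by omega : (0:Int) < d), ← hdC, ← hnC]
        exact (Int.natCast_ediv _ _).symm
      have hqcond : (PySem.Int.floordiv N d ≠ d) ↔ (N.toNat / d.toNat ≠ d.toNat) := by
        rw [hq, ← hdC]
        exact not_congr Int.natCast_inj
      rw [if_pos hm,
        pvPairSum N.toNat d.toNat K.toNat (by omega) (by omega) hjj hdvd]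
      by_cases hne : N.toNat / d.toNat ≠ d.toNat
      · rw [if_pos (hqcond.mpr hne), if_pos hne, hq]
        push_cast [hdC]
        ring
      · rw [if_neg (fun hcc => hne (hqcond.mp hcc)), if_neg hne]
        push_cast [hdC]
        ring
    · have hndvd : ¬ d.toNat ∣ N.toNat := by
        intro hdd
        apply hm
        apply (PySem.Int.mod_eq_zero_iff_dvd N d).mpr
        rw [← hdC, ← hnC]
        exact_mod_cast hdd
      rw [if_neg hm, pvTset_step_ndvd N.toNat d.toNat hndvd]
  | case2 d R h =>
    intro hd
    have hdC : ((d.toNat : ℕ) : ℤ) = d := Int.toNat_of_nonneg (by omega)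
    have hnsq : ¬ d.toNat * d.toNat ≤ N.toNat := by
      intro hc
      apply h
      refine ⟨?_, hd⟩
      have : ((d.toNat * d.toNat : ℕ) : ℤ) ≤ ((N.toNat : ℕ) : ℤ) := by exact_mod_cast hc
      rw [Int.toNat_of_nonneg (by omega : (0:Int) ≤ N)] at this
      push_cast [hdC] at this
      exact this
    rw [pvDivLoop, dif_neg h, pvTset_empty N.toNat d.toNat hnsq]
    simp

-- ===== VERDICT (by name: the statement is the Claim_ definition above) =====
theorem Divisor_Sigma_spec : Claim_equal_Divisor_Sigma := by
  intro N K _hDom hPre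
  unfold Spec_Divisor_Sigma
  by_cases hN1 : N = 1
  · subst hN1
    rw [Divisor_Sigma, if_pos rfl, Divisor_Sigma_alt, if_pos (le_refl (1:Int))]
  by_cases hNle : N ≤ 1
  · rw [Divisor_Sigma, if_neg hN1, Divisor_Sigma_alt, if_pos hNle]
    simp only
    rw [pvDsLoop, dif_neg (by intro hc; omega)]
    rw [if_neg (by simp only; omega)]
  · have hN2 : 2 ≤ N := by omega
    have hK : 0 ≤ K := by
      rcases hPre with h | h
      · exact h
      · omega
    obtain ⟨hg1, hg2, hg3⟩ := pvFAFull_good N hN2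
    -- A computes the product of pvTerm over its factor list
    have hA : Divisor_Sigma N K = ((pvFAFull N).map (pvTerm K)).prod := by
      rw [Divisor_Sigma, if_neg hN1]
      simp only
      rw [pvDsLoop_eq K 2 N 1]
      simp only [one_mul]
      unfold pvFAFull
      by_cases hf : 1 < (pvFacA 2 N).1
      · rw [if_pos hf, if_pos hf, List.map_append, List.prod_append]
        simp only [List.map_cons, List.map_nil, List.prod_cons, List.prod_nil]
        rw [pvTerm_leftover _ K (by omega) hK, mul_one]
      · rw [if_neg hf, if_neg hf]
    -- both sides equal sigma of N
    rw [hA, pvGood_to_sigma K hK (pvFAFull N) hg1 hg2, hg3,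
      Divisor_Sigma_alt, if_neg hNle,
      pvDivLoop_sum K N (by omega) 1 0 (le_refl 1)]
    rw [show (1:ℤ).toNat = 1 from rfl, pvTset_one N.toNat (by omega),
      ArithmeticFunction.sigma_apply]
    simp
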